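-- pv_equiv track=rewrite | github.com/doryatir-star/jarvis-voice | brain.py | _strip_prefixes
-- ===== SOURCE A (Python) =====
-- WAKE_PREFIXES = ("jarvis", "hey jarvis", "ok jarvis", "okay jarvis")
--
-- FILLER_PREFIXES = (
--     "can you", "could you", "please", "i want you to", "i need you to",
--     "would you", "will you", "just", "now",
-- )
--
-- def _strip_prefixes(text: str) -> str:
--     t = text.strip().lower().rstrip("?.!")
--     for w in WAKE_PREFIXES:
--         if t.startswith(w):
--             t = t[len(w):].lstrip(" ,")
--             break
--     changed = True
--     while changed:
--         changed = False
--         for f in FILLER_PREFIXES: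
--             if t.startswith(f + " "):
--                 t = t[len(f) + 1:]
--                 changed = True
--     return t.strip()
-- ===== SOURCE B (Python) =====
-- WAKE_PREFIXES = ("jarvis", "hey jarvis", "ok jarvis", "okay jarvis")
--
-- FILLER_PREFIXES = (
--     "can you", "could you", "please", "i want you to", "i need you to",
--     "would you", "will you", "just", "now",
-- )
--
-- def _drop_fillers(t):
--     f = next((f for f in FILLER_PREFIXES if t.startswith(f + " ")), None)
--     return t if f is None else _drop_fillers(t[len(f) + 1:])
--
-- def _strip_prefixes(text: str) -> str:
--     t = text.strip().lower().rstrip("?.!")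
--     w = next((w for w in WAKE_PREFIXES if t.startswith(w)), None)
--     if w is not None:
--         t = t[len(w):].lstrip(" ,")
--     return _drop_fillers(t).strip()
-- ===== Notes on version B (the rewrite author's own statement) =====
-- stated objective: simpler
-- what changed: A's wake-word for-loop-with-break becomes a single first-match lookup, and A's changed-flag while-loop that repeatedly sweeps all filler prefixes until a fixed point becomes a recursion that strips the first matching filler and restarts; equivalence holds because no filler+space is a prefix of another, so at most one filler ever matches.
import Mathlib
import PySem

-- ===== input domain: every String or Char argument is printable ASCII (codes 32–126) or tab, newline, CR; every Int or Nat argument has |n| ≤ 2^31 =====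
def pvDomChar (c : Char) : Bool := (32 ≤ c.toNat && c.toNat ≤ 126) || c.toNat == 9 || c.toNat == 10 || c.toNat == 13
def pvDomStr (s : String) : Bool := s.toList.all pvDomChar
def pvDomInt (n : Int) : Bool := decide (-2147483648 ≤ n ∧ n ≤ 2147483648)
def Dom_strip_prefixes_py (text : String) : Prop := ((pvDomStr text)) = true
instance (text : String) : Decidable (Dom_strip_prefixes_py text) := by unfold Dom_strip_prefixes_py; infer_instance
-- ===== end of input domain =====

-- B replaces A's changed-flag fixed-point sweeps over the filler table by a first-match-and-restart
-- recursion (and the wake for-loop-with-break by one first-match lookup): simpler, same results.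

-- Shared module constants (WAKE_PREFIXES / FILLER_PREFIXES of the Python module, as char lists)
def wakePrefixes : List (List Char) :=
  ["jarvis".toList, "hey jarvis".toList, "ok jarvis".toList, "okay jarvis".toList]

def fillerPrefixes : List (List Char) :=
  ["can you".toList, "could you".toList, "please".toList, "i want you to".toList,
   "i need you to".toList, "would you".toList, "will you".toList, "just".toList, "now".toList]

-- Python s.rstrip(chars) / s.lstrip(chars) with an explicit chars argument (one-sided; exact:
-- drops exactly the characters listed in `chars` from the respective end)
def pyRstripChars (s chars : List Char) : List Char :=
  (s.reverse.dropWhile (chars.contains ·)).reverse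

def pyLstripChars (s chars : List Char) : List Char :=
  s.dropWhile (chars.contains ·)

-- ===== PORT A =====
-- 'for w in WAKE_PREFIXES: if t.startswith(w): t = t[len(w):].lstrip(" ,"); break'
def aWakeLoop : List (List Char) → List Char → List Char
  | [], t => t
  | w :: ws, t =>
      if PySem.Chars.startswith t w then pyLstripChars (t.drop w.length) [' ', ','] else aWakeLoop ws t

-- the body of A's inner 'for f in FILLER_PREFIXES' pass, threading (t, changed)
def aStep (s : List Char × Bool) (f : List Char) : List Char × Bool :=
  if PySem.Chars.startswith s.1 (f ++ [' ']) then (s.1.drop (f.length + 1), true) else s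

-- invariant of one pass, needed for the while-loop's termination (cited in decreasing_by)
theorem aPass_spec (fs : List (List Char)) (t : List Char) (c : Bool) :
    ((fs.foldl aStep (t, c)).2 = c ∧ (fs.foldl aStep (t, c)).1 = t) ∨
    ((fs.foldl aStep (t, c)).2 = true ∧ (fs.foldl aStep (t, c)).1.length < t.length) := by
  induction fs generalizing t c with
  | nil => exact Or.inl ⟨rfl, rfl⟩
  | cons f fs ih =>
      simp only [List.foldl_cons, aStep]
      by_cases h : PySem.Chars.startswith t (f ++ [' ']) = true
      · simp only [h, if_pos]
        have hpre : (f ++ [' ']) <+: t := (PySem.Chars.startswith_iff t (f ++ [' '])).1 h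
        have hlen : f.length + 1 ≤ t.length := by
          have := hpre.length_le; simpa using this
        have hdrop : (t.drop (f.length + 1)).length < t.length := by
          simp [List.length_drop]; omega
        rcases ih (t.drop (f.length + 1)) true with ⟨h2, h1⟩ | ⟨h2, h1⟩
        · exact Or.inr ⟨h2, by rw [h1]; exact hdrop⟩
        · exact Or.inr ⟨h2, lt_trans h1 hdrop⟩
      · simp only [h, if_neg, Bool.not_eq_true]
        simpa using ih t c

-- 'changed = True; while changed: changed = False; for f in FILLER_PREFIXES: …'
def aLoop (t : List Char) : List Char :=
  if h : (fillerPrefixes.foldl aStep (t, false)).2 = true then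
    aLoop (fillerPrefixes.foldl aStep (t, false)).1
  else t
termination_by t.length
decreasing_by
  rcases aPass_spec fillerPrefixes t false with ⟨h2, _⟩ | ⟨_, h1⟩
  · exact absurd h (by simp [h2])
  · exact h1

def strip_prefixes_py (text : String) : String :=
  let t0 := pyRstripChars (PySem.Chars.lower (PySem.Chars.strip text.toList)) ['?', '.', '!']
  let t1 := aWakeLoop wakePrefixes t0
  String.ofList (PySem.Chars.strip (aLoop t1))

-- ===== PORT B =====
-- termination fact for the first-match-and-restart recursion (cited in decreasing_by)
theorem bFind_dec {t f : List Char}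
    (h : fillerPrefixes.find? (fun f => PySem.Chars.startswith t (f ++ [' '])) = some f) :
    (t.drop (f.length + 1)).length < t.length := by
  have hp : PySem.Chars.startswith t (f ++ [' ']) = true := by
    simpa using List.find?_some h
  have hpre : (f ++ [' ']) <+: t := (PySem.Chars.startswith_iff t (f ++ [' '])).1 hp
  have hlen : f.length + 1 ≤ t.length := by have := hpre.length_le; simpa using this
  simp [List.length_drop]; omega

-- 'f = next((f for f in FILLER_PREFIXES if t.startswith(f + " ")), None);
--  return t if f is None else _drop_fillers(t[len(f)+1:])'
def bDropFillers (t : List Char) : List Char :=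
  match h : fillerPrefixes.find? (fun f => PySem.Chars.startswith t (f ++ [' '])) with
  | some f => bDropFillers (t.drop (f.length + 1))
  | none => t
termination_by t.length
decreasing_by exact bFind_dec h

def strip_prefixes_py_alt (text : String) : String :=
  let t0 := pyRstripChars (PySem.Chars.lower (PySem.Chars.strip text.toList)) ['?', '.', '!']
  let t1 :=
    match wakePrefixes.find? (fun w => PySem.Chars.startswith t0 w) with
    | some w => pyLstripChars (t0.drop w.length) [' ', ',']
    | none => t0
  String.ofList (PySem.Chars.strip (bDropFillers t1))

-- ===== PRECONDITION & SPEC =====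
def Spec_strip_prefixes_py (text : String) (out : String) : Prop := out = strip_prefixes_py_alt text
instance (text : String) (out : String) : Decidable (Spec_strip_prefixes_py text out) := by unfold Spec_strip_prefixes_py; infer_instance

-- ===== CLAIM (what is proved, stated in full; the proofs are below) =====
def Claim_equal_strip_prefixes_py : Prop := ∀ (text : String), Dom_strip_prefixes_py text → Spec_strip_prefixes_py text (strip_prefixes_py text)

-- ===== LEMMAS AND PROOFS =====

-- A's for-with-break over the wake prefixes IS the first-match lookup
theorem aWake_eq_find (ws : List (List Char)) (t : List Char) :
    aWakeLoop ws t =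
      (match ws.find? (fun w => PySem.Chars.startswith t w) with
       | some w => pyLstripChars (t.drop w.length) [' ', ',']
       | none => t) := by
  induction ws with
  | nil => rfl
  | cons w ws ih =>
      by_cases h : PySem.Chars.startswith t w = true
      · rw [aWakeLoop, if_pos h, List.find?_cons_of_pos h]
      · rw [aWakeLoop, if_neg h, List.find?_cons_of_neg (by simpa using h), ih]

-- no filler+space is a proper prefix of another filler+space (checked over the literal table)
theorem filler_nonprefix :
    ∀ f1 ∈ fillerPrefixes, ∀ f2 ∈ fillerPrefixes,
      (f1 ++ [' ']) <+: (f2 ++ [' ']) → f1 = f2 := by decide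

-- hence at most one filler matches any given t
theorem filler_unique {t f1 f2 : List Char} (h1 : f1 ∈ fillerPrefixes) (h2 : f2 ∈ fillerPrefixes)
    (p1 : (f1 ++ [' ']) <+: t) (p2 : (f2 ++ [' ']) <+: t) : f1 = f2 := by
  rcases List.prefix_or_prefix_of_prefix p1 p2 with h | h
  · exact filler_nonprefix f1 h1 f2 h2 h
  · exact (filler_nonprefix f2 h2 f1 h1 h).symm

-- stripping any matching filler is absorbed by bDropFillers
theorem bDrop_step {t f : List Char} (hf : f ∈ fillerPrefixes) (hp : (f ++ [' ']) <+: t) :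
    bDropFillers t = bDropFillers (t.drop (f.length + 1)) := by
  rw [bDropFillers]
  cases h : fillerPrefixes.find? (fun f => PySem.Chars.startswith t (f ++ [' '])) with
  | none =>
      exfalso
      have := List.find?_eq_none.1 h f hf
      exact this ((PySem.Chars.startswith_iff t (f ++ [' '])).2 hp)
  | some f' =>
      have hf' : f' ∈ fillerPrefixes := List.mem_of_find?_eq_some h
      have hp' : (f' ++ [' ']) <+: t :=
        (PySem.Chars.startswith_iff t (f' ++ [' '])).1 (by simpa using List.find?_some h)
      rw [filler_unique hf' hf hp' hp]

-- one pass of A's inner loop does not change bDropFillers' value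
theorem pass_bDrop (fs : List (List Char)) (hfs : ∀ f ∈ fs, f ∈ fillerPrefixes)
    (t : List Char) (c : Bool) :
    bDropFillers (fs.foldl aStep (t, c)).1 = bDropFillers t := by
  induction fs generalizing t c with
  | nil => rfl
  | cons f fs ih =>
      simp only [List.foldl_cons, aStep]
      by_cases h : PySem.Chars.startswith t (f ++ [' ']) = true
      · simp only [h, if_pos]
        have hpre : (f ++ [' ']) <+: t := (PySem.Chars.startswith_iff t (f ++ [' '])).1 h
        rw [ih (fun g hg => hfs g (List.mem_cons_of_mem _ hg)) (t.drop (f.length + 1)) true]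
        exact (bDrop_step (hfs f (List.mem_cons_self)) hpre).symm
      · simp only [h, if_neg, Bool.not_eq_true]
        exact ih (fun g hg => hfs g (List.mem_cons_of_mem _ hg)) t c

-- if a pass leaves the changed flag False, no filler matched t
theorem pass_unchanged (fs : List (List Char)) (t : List Char)
    (h : (fs.foldl aStep (t, false)).2 = false) :
    ∀ f ∈ fs, PySem.Chars.startswith t (f ++ [' ']) = false := by
  induction fs generalizing t with
  | nil => intro f hf; cases hf
  | cons f fs ih =>
      intro g hg
      by_cases hh : PySem.Chars.startswith t (f ++ [' ']) = true
      · exfalso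
        have := aPass_spec fs (t.drop (f.length + 1)) true
        simp only [List.foldl_cons, aStep, hh, if_pos] at h
        rcases this with ⟨h2, _⟩ | ⟨h2, _⟩ <;> rw [h2] at h <;> cases h
      · simp only [List.foldl_cons, aStep, hh, if_neg, Bool.not_eq_true] at h
        rcases List.mem_cons.1 hg with rfl | hg
        · simpa using hh
        · exact ih t h g hg

-- a t with no matching filler is a fixed point of bDropFillers
theorem bDrop_fixed (t : List Char)
    (h : ∀ f ∈ fillerPrefixes, PySem.Chars.startswith t (f ++ [' ']) = false) :
    bDropFillers t = t := by
  rw [bDropFillers]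
  cases hf : fillerPrefixes.find? (fun f => PySem.Chars.startswith t (f ++ [' '])) with
  | none => rfl
  | some f =>
      exfalso
      have hmem : f ∈ fillerPrefixes := List.mem_of_find?_eq_some hf
      have : PySem.Chars.startswith t (f ++ [' ']) = true := by simpa using List.find?_some hf
      rw [h f hmem] at this; cases this

-- A's fixed-point sweep loop computes exactly B's first-match recursion
theorem aLoop_eq_aux : ∀ (n : Nat) (t : List Char), t.length ≤ n → aLoop t = bDropFillers t := by
  intro n
  induction n with
  | zero =>
      intro t ht
      conv_lhs => rw [aLoop.eq_def]
      by_cases h : (fillerPrefixes.foldl aStep (t, false)).2 = true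
      · rcases aPass_spec fillerPrefixes t false with ⟨h2, _⟩ | ⟨_, h1⟩
        · rw [h2] at h; cases h
        · exact absurd h1 (by omega)
      · rw [dif_neg h]
        exact (bDrop_fixed t (pass_unchanged fillerPrefixes t (by simpa using h))).symm
  | succ n ih =>
      intro t ht
      conv_lhs => rw [aLoop.eq_def]
      by_cases h : (fillerPrefixes.foldl aStep (t, false)).2 = true
      · rw [dif_pos h]
        rcases aPass_spec fillerPrefixes t false with ⟨h2, _⟩ | ⟨_, h1⟩
        · rw [h2] at h; cases h
        · rw [ih (fillerPrefixes.foldl aStep (t, false)).1 (by omega)]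
          exact pass_bDrop fillerPrefixes (fun _ hg => hg) t false
      · rw [dif_neg h]
        exact (bDrop_fixed t (pass_unchanged fillerPrefixes t (by simpa using h))).symm

theorem aLoop_eq (t : List Char) : aLoop t = bDropFillers t :=
  aLoop_eq_aux t.length t le_rfl

-- ===== VERDICT (by name: the statement is the Claim_ definition above) =====
theorem strip_prefixes_py_spec : Claim_equal_strip_prefixes_py := by
  intro text _
  simp only [Spec_strip_prefixes_py, strip_prefixes_py, strip_prefixes_py_alt]
  rw [aWake_eq_find, aLoop_eq]
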